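-- pv_equiv track=rewrite | github.com/EliBrank/wurdo | ml_engine/services/efficient_word_service.py | _group_words_by_first_token
-- ===== SOURCE A (Python) =====
-- from typing import Dict, List, Tuple, Optional, Any
--
-- def _group_words_by_first_token(tokenized_words: Dict[str, List[int]]) -> Dict[int, List[Tuple[str, List[int]]]]:
--     """
--     Group words by their first token for efficient probability generation.
--
--     Args:
--         tokenized_words: Dict mapping words to their token sequences
--
--     Returns:
--         Dict mapping first tokens to lists of (word, tokens) tuples
--     """
--     first_token_groups = {}
--
--     for word, tokens in tokenized_words.items():
--         if not tokens:
--             continue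
--
--         first_token = tokens[0]
--         if first_token not in first_token_groups:
--             first_token_groups[first_token] = []
--
--         first_token_groups[first_token].append((word, tokens))
--
--     return first_token_groups
-- ===== SOURCE B (Python) =====
-- def _group_words_by_first_token(tokenized_words):
--     # Two-pass: collect distinct first tokens in first-occurrence order,
--     # then build each group by filtering the entries once per key.
--     items = [(w, t) for w, t in tokenized_words.items() if t]
--     order = []
--     seen = set()
--     for _, t in items:
--         if t[0] not in seen:
--             order.append(t[0])
--             seen.add(t[0])
--     return {ft: [(w, t) for w, t in items if t[0] == ft] for ft in order}
-- ===== Notes on version B (the rewrite author's own statement) =====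
-- stated objective: alternative
-- what changed: A builds the groups in one pass by growing a dict and appending to the group of each entry's first token; B instead filters out empty-token entries, collects the distinct first tokens in first-occurrence order, and then builds each group by a separate filter pass over the entries per key.
import Mathlib
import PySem

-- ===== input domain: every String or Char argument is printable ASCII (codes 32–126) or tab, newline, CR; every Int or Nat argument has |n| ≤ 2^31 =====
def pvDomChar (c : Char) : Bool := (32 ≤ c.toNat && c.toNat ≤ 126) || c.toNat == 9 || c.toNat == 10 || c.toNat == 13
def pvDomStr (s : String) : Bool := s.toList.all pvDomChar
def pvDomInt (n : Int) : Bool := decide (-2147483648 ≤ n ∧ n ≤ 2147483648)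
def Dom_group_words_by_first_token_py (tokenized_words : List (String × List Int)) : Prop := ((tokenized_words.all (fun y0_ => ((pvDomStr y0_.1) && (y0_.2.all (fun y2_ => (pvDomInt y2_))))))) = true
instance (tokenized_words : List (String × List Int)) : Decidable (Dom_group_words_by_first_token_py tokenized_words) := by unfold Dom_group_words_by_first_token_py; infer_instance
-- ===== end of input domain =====

-- ===== PORT A =====
def group_words_by_first_token_py (tokenized_words : List (String × List Int)) : List (Int × List (String × List Int)) :=
  (tokenized_words.foldl (fun d p =>
      match p.2 with
      | [] => d                                -- if not tokens: continue
      | t :: _ =>                              -- first_token = tokens[0]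
        let d' := if d.contains t then d else d.insert t ([] : List (String × List Int))
        d'.modify t [] (fun g => g ++ [p]))    -- first_token_groups[first_token].append((word, tokens))
    PySem.Dict.empty).items

-- ===== PORT B =====
-- B: filter out empty-token entries, collect distinct first tokens in order, then one filter per key.
-- The final dict comprehension is rendered as its items list directly (its keys `order` are distinct).
def group_words_by_first_token_py_alt (tokenized_words : List (String × List Int)) : List (Int × List (String × List Int)) :=
  let items := tokenized_words.filter (fun p => !p.2.isEmpty)
  let order := (items.foldl (fun (os : List Int × PySem.Set Int) p =>
      match p.2 with
      | [] => os
      | t :: _ => if PySem.Set.contains os.2 t then os else (os.1 ++ [t], PySem.Set.add os.2 t))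
    ([], PySem.Set.empty)).1
  order.map (fun ft => (ft, items.filter (fun p =>
      match p.2 with
      | [] => false
      | t :: _ => t == ft)))

-- ===== PRECONDITION & SPEC =====
def Spec_group_words_by_first_token_py (tokenized_words : List (String × List Int)) (out : List (Int × List (String × List Int))) : Prop := out = group_words_by_first_token_py_alt tokenized_words
instance (tokenized_words : List (String × List Int)) (out : List (Int × List (String × List Int))) : Decidable (Spec_group_words_by_first_token_py tokenized_words out) := by unfold Spec_group_words_by_first_token_py; infer_instance

-- ===== CLAIM (what is proved, stated in full; the proofs are below) =====
def Claim_equal_group_words_by_first_token_py : Prop := ∀ (tokenized_words : List (String × List Int)), Dom_group_words_by_first_token_py tokenized_words → Spec_group_words_by_first_token_py tokenized_words (group_words_by_first_token_py tokenized_words)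

-- ===== LEMMAS AND PROOFS =====

-- the key a nonempty-token entry is grouped under
def pvKey (p : String × List Int) : Int := p.2.headI

-- the update step of A, rewritten with headI (only applied to nonempty-token entries)
def pvMStep (d : PySem.Dict Int (List (String × List Int))) (p : String × List Int) :
    PySem.Dict Int (List (String × List Int)) :=
  d.modify (pvKey p) [] (fun g => g ++ [p])

lemma pvNodupMStep (d : PySem.Dict Int (List (String × List Int))) (h : d.keys.Nodup)
    (p : String × List Int) : (pvMStep d p).keys.Nodup := by
  have := PySem.Dict.nodup_keys_foldl_modify_key [p] pvKey []
    (fun _ p => (fun g => g ++ [p])) d h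
  simpa [List.foldl, pvMStep] using this

-- modify after inserting the default at a fresh key is modify on the original dict
lemma pvInsertNilModify (d : PySem.Dict Int (List (String × List Int))) (h : d.keys.Nodup)
    (k : Int) (f : List (String × List Int) → List (String × List Int))
    (hc : d.contains k = false) :
    (d.insert k []).modify k [] f = d.modify k [] f := by
  have hk : k ∉ d.keys := by
    intro hm
    rw [← PySem.Dict.contains_iff_mem_keys] at hm
    simp [hc] at hm
  have hkeysL : ((d.insert k []).modify k [] f).keys = d.keys ++ [k] := by
    rw [PySem.Dict.keys_modify, PySem.Dict.keys_insert_of_contains,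
        PySem.Dict.keys_insert_of_not_contains _ _ hc]
    exact PySem.Dict.contains_insert_self d k []
  have hkeysR : (d.modify k [] f).keys = d.keys ++ [k] := by
    rw [PySem.Dict.keys_modify, PySem.Dict.keys_insert_of_not_contains _ _ hc]
  have hnd : (d.keys ++ [k]).Nodup := by
    simp only [List.nodup_append, List.nodup_singleton, h, true_and]
    intro a ha b hb
    rw [List.mem_singleton] at hb
    subst hb
    exact fun hab => hk (hab ▸ ha)
  apply PySem.Dict.ext
  rw [PySem.Dict.items_eq_map_keys _ (by rw [hkeysL]; exact hnd) [],
      PySem.Dict.items_eq_map_keys _ (by rw [hkeysR]; exact hnd) [],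
      hkeysL, hkeysR]
  apply List.map_congr_left
  intro x _
  rw [PySem.Dict.getD_modify, PySem.Dict.getD_modify]
  by_cases hx : x = k
  · subst hx
    simp [PySem.Dict.getD_of_not_contains d [] hc]
  · simp [hx, PySem.Dict.getD_insert_of_ne d [] [] hx]

-- A's fold over nonempty-token entries is the pvMStep fold
lemma pvFoldEq (l : List (String × List Int)) :
    ∀ (d : PySem.Dict Int (List (String × List Int))), d.keys.Nodup →
    (∀ p ∈ l, p.2 ≠ []) →
    l.foldl (fun d p =>
      match p.2 with
      | [] => d
      | t :: _ =>
        let d' := if d.contains t then d else d.insert t ([] : List (String × List Int))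
        d'.modify t [] (fun g => g ++ [p])) d
    = l.foldl pvMStep d := by
  induction l with
  | nil => intro d _ _; rfl
  | cons p l ih =>
    intro d hnd hall
    obtain ⟨t, ts, hp⟩ : ∃ t ts, p.2 = t :: ts := by
      cases hpt : p.2 with
      | nil => exact absurd hpt (hall p (by simp))
      | cons a b => exact ⟨a, b, rfl⟩
    have hkey : pvKey p = t := by simp [pvKey, hp]
    have hstep : (match p.2 with
      | [] => d
      | t :: _ =>
        let d' := if d.contains t then d else d.insert t ([] : List (String × List Int))
        d'.modify t [] (fun g => g ++ [p])) = pvMStep d p := by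
      rw [hp]
      by_cases hc : d.contains t = true
      · simp only [hc, if_pos]
        simp [pvMStep, hkey]
      · simp only [Bool.not_eq_true] at hc
        simp only [hc, Bool.false_eq_true, if_neg, not_false_iff]
        rw [pvInsertNilModify d hnd t _ hc]
        simp [pvMStep, hkey]
    simp only [List.foldl_cons, hstep]
    exact ih (pvMStep d p) (pvNodupMStep d hnd p) (fun q hq => hall q (by simp [hq]))

-- A's fold skips empty-token entries: fold over the whole list = fold over the filtered list
lemma pvFoldFilter (l : List (String × List Int)) :
    ∀ (d : PySem.Dict Int (List (String × List Int))),
    l.foldl (fun d p =>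
      match p.2 with
      | [] => d
      | t :: _ =>
        let d' := if d.contains t then d else d.insert t ([] : List (String × List Int))
        d'.modify t [] (fun g => g ++ [p])) d
    = (l.filter (fun p => !p.2.isEmpty)).foldl (fun d p =>
      match p.2 with
      | [] => d
      | t :: _ =>
        let d' := if d.contains t then d else d.insert t ([] : List (String × List Int))
        d'.modify t [] (fun g => g ++ [p])) d := by
  induction l with
  | nil => intro d; rfl
  | cons p l ih =>
    intro d
    cases hpt : p.2 with
    | nil => simp [List.foldl_cons, hpt, ih]
    | cons a b => simp [List.foldl_cons, hpt, ih]

-- B's order loop computes PySem.Set.update of the first tokens, keeping the pair components equal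
lemma pvOrderLoop (l : List (String × List Int)) :
    ∀ (s : PySem.Set Int), (∀ p ∈ l, p.2 ≠ []) →
    l.foldl (fun (os : List Int × PySem.Set Int) p =>
      match p.2 with
      | [] => os
      | t :: _ => if PySem.Set.contains os.2 t then os else (os.1 ++ [t], PySem.Set.add os.2 t))
      (s, s)
    = (PySem.Set.update s (l.map pvKey), PySem.Set.update s (l.map pvKey)) := by
  induction l with
  | nil => intro s _; simp [PySem.Set.update]
  | cons p l ih =>
    intro s hall
    obtain ⟨t, ts, hp⟩ : ∃ t ts, p.2 = t :: ts := by
      cases hpt : p.2 with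
      | nil => exact absurd hpt (hall p (by simp))
      | cons a b => exact ⟨a, b, rfl⟩
    have hkey : pvKey p = t := by simp [pvKey, hp]
    have hupd : ∀ xs : List Int, PySem.Set.update s (t :: xs) = PySem.Set.update (PySem.Set.add s t) xs := by
      intro xs; simp [PySem.Set.update]
    have hstep : (match p.2 with
      | [] => ((s, s) : List Int × PySem.Set Int)
      | t :: _ => if PySem.Set.contains s t then (s, s) else (s ++ [t], PySem.Set.add s t))
      = (PySem.Set.add s t, PySem.Set.add s t) := by
      rw [hp]
      by_cases hm : t ∈ s <;> simp [PySem.Set.add, hm]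
    simp only [List.foldl_cons, hstep, List.map_cons, hkey, hupd]
    exact ih (PySem.Set.add s t) (fun q hq => hall q (by simp [hq]))

-- B's per-key filter agrees with filtering on pvKey over nonempty-token entries
lemma pvGroupFilter (l : List (String × List Int)) (h : ∀ p ∈ l, p.2 ≠ []) (k : Int) :
    l.filter (fun p =>
      match p.2 with
      | [] => false
      | t :: _ => t == k)
    = l.filter (fun p => pvKey p == k) := by
  apply List.filter_congr
  intro p hp
  obtain ⟨t, ts, hpt⟩ : ∃ t ts, p.2 = t :: ts := by
    cases hpt : p.2 with
    | nil => exact absurd hpt (h p hp)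
    | cons a b => exact ⟨a, b, rfl⟩
  simp [hpt, pvKey]

-- value of the pvMStep fold at a key
lemma pvFoldGetD (l : List (String × List Int)) (k : Int) :
    (l.foldl pvMStep PySem.Dict.empty).getD k []
    = l.filter (fun p => pvKey p == k) := by
  have hmap : l.foldl pvMStep PySem.Dict.empty
      = ((l.map (fun p => (pvKey p, p))).foldl
          (fun d q => d.modify q.1 [] (fun g => g ++ [q.2])) PySem.Dict.empty) := by
    rw [List.foldl_map]
    rfl
  rw [hmap, PySem.Dict.getD_foldl_modify_append, PySem.Dict.getD_empty]
  rw [List.filter_map]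
  simp [List.map_map, Function.comp_def]

theorem pv_main (tw : List (String × List Int)) :
    group_words_by_first_token_py tw = group_words_by_first_token_py_alt tw := by
  unfold group_words_by_first_token_py group_words_by_first_token_py_alt
  set l := tw.filter (fun p => !p.2.isEmpty) with hl
  have hall : ∀ p ∈ l, p.2 ≠ [] := by
    intro p hp
    have := List.of_mem_filter hp
    simpa [List.isEmpty_iff] using this
  rw [pvFoldFilter tw PySem.Dict.empty, ← hl,
      pvFoldEq l PySem.Dict.empty (by simp [PySem.Dict.keys_empty]) hall]
  have hndk : (l.foldl pvMStep PySem.Dict.empty).keys.Nodup := by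
    have := PySem.Dict.nodup_keys_foldl_modify_key l pvKey []
      (fun _ p => (fun g => g ++ [p])) PySem.Dict.empty (by simp [PySem.Dict.keys_empty])
    simpa [pvMStep] using this
  have hkeys : (l.foldl pvMStep PySem.Dict.empty).keys = PySem.Set.update [] (l.map pvKey) := by
    have := PySem.Dict.keys_foldl_modify_key l pvKey []
      (fun _ p => (fun g => g ++ [p])) PySem.Dict.empty
    simpa [pvMStep, PySem.Dict.keys_empty] using this
  rw [PySem.Dict.items_eq_map_keys _ hndk [], hkeys]
  have horder : (List.foldl (fun (os : List Int × PySem.Set Int) p =>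
      match p.2 with
      | [] => os
      | t :: _ => if PySem.Set.contains os.2 t then os else (os.1 ++ [t], PySem.Set.add os.2 t))
      ([], PySem.Set.empty) l).1 = PySem.Set.update [] (l.map pvKey) :=
    congrArg Prod.fst (pvOrderLoop l [] hall)
  show List.map (fun k => (k, (List.foldl pvMStep PySem.Dict.empty l).getD k [])) (PySem.Set.update [] (List.map pvKey l))
    = List.map (fun ft => (ft, List.filter (fun p =>
        match p.2 with
        | [] => false
        | t :: _ => t == ft) l))
      ((List.foldl (fun (os : List Int × PySem.Set Int) p =>
        match p.2 with
        | [] => os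
        | t :: _ => if PySem.Set.contains os.2 t then os else (os.1 ++ [t], PySem.Set.add os.2 t))
        ([], PySem.Set.empty) l).1)
  rw [horder]
  apply List.map_congr_left
  intro k _
  rw [pvFoldGetD l k, pvGroupFilter l hall k]


-- ===== VERDICT (by name: the statement is the Claim_ definition above) =====
theorem group_words_by_first_token_py_spec : Claim_equal_group_words_by_first_token_py := by
  intro tw _
  unfold Spec_group_words_by_first_token_py
  exact pv_main tw
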